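-- pv_equiv track=rewrite | github.com/crocs-muni/scrutiny-viz | report/service.py | pair_group_changes
-- ===== SOURCE A (Python) =====
-- from typing import Any, Dict, Iterable, List, Optional, Tuple
--
-- def pair_group_changes(removed: List[Dict[str, Any]], added: List[Dict[str, Any]]):
--     out = []
--     removed_items = removed[:]
--     added_items = added[:]
--     while removed_items and added_items:
--         out.append(("arrow", removed_items.pop(0), added_items.pop(0)))
--     for item in removed_items:
--         out.append(("removed", item, None))
--     for item in added_items:
--         out.append(("added", None, item))
--     return out
-- ===== SOURCE B (Python) =====
-- from itertools import zip_longest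
--
-- _SENTINEL = object()
--
-- def pair_group_changes(removed, added):
--     out = []
--     for r, a in zip_longest(removed, added, fillvalue=_SENTINEL):
--         if r is _SENTINEL:
--             out.append(("added", None, a))
--         elif a is _SENTINEL:
--             out.append(("removed", r, None))
--         else:
--             out.append(("arrow", r, a))
--     return out
-- ===== Notes on version B (the rewrite author's own statement) =====
-- stated objective: simpler
-- what changed: Replaces the while-pop(0) loop plus two trailing for-loops with a single zip_longest pass over sentinel-padded pairs, branching once per pair.
import Mathlib
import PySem

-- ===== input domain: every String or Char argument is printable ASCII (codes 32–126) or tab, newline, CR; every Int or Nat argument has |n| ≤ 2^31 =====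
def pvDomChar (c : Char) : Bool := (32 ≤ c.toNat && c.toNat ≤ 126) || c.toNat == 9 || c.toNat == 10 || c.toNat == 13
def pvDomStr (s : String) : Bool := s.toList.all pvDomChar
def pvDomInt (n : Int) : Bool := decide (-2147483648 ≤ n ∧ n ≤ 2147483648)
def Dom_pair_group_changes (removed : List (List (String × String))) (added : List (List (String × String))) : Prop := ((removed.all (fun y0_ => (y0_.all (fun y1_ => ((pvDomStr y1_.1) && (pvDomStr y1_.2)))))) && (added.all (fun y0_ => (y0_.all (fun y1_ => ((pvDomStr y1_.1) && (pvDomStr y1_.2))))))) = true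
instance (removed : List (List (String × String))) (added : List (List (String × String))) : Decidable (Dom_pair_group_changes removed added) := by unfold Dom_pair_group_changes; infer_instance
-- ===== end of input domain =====

-- B replaces the while-pop(0) loop plus two trailing for-loops with one zip_longest-style branching pass (objective: simpler).


-- ===== PORT A =====
-- while removed_items and added_items: out.append(("arrow", pop(0), pop(0)))
def pgcA_loop (out : List (String × (Option (List (String × String))) × (Option (List (String × String)))))
    (rem add : List (List (String × String))) :
    List (String × (Option (List (String × String))) × (Option (List (String × String)))) :=
  match rem, add with
  | r :: rs, a :: as_ => pgcA_loop (out ++ [("arrow", some r, some a)]) rs as_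
  | rem, add =>
      (out ++ rem.map (fun item => ("removed", some item, none)))
        ++ add.map (fun item => ("added", none, some item))

def pair_group_changes (removed : List (List (String × String))) (added : List (List (String × String))) : List (String × (Option (List (String × String))) × (Option (List (String × String)))) :=
  pgcA_loop [] removed added

-- ===== PORT B =====
-- single zip_longest-style pass: three cases per step (both exhausted / one exhausted / pair)
def pair_group_changes_alt (removed : List (List (String × String))) (added : List (List (String × String))) : List (String × (Option (List (String × String))) × (Option (List (String × String)))) :=
  match removed, added with
  | [], add => add.map (fun a => ("added", none, some a))
  | rem, [] => rem.map (fun r => ("removed", some r, none))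
  | r :: rs, a :: as_ => ("arrow", some r, some a) :: pair_group_changes_alt rs as_

-- ===== PRECONDITION & SPEC =====
def Spec_pair_group_changes (removed : List (List (String × String))) (added : List (List (String × String))) (out : List (String × (Option (List (String × String))) × (Option (List (String × String))))) : Prop := out = pair_group_changes_alt removed added
instance (removed : List (List (String × String))) (added : List (List (String × String))) (out : List (String × (Option (List (String × String))) × (Option (List (String × String))))) : Decidable (Spec_pair_group_changes removed added out) := by unfold Spec_pair_group_changes; infer_instance

-- ===== CLAIM (what is proved, stated in full; the proofs are below) =====
def Claim_equal_pair_group_changes : Prop := ∀ (removed : List (List (String × String))) (added : List (List (String × String))), Dom_pair_group_changes removed added → Spec_pair_group_changes removed added (pair_group_changes removed added)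

-- ===== LEMMAS AND PROOFS =====
theorem pgcA_loop_eq_alt (rem add : List (List (String × String)))
    (out : List (String × (Option (List (String × String))) × (Option (List (String × String))))) :
    pgcA_loop out rem add = out ++ pair_group_changes_alt rem add := by
  induction rem generalizing add out with
  | nil => cases add <;> simp [pgcA_loop, pair_group_changes_alt]
  | cons r rs ih =>
      cases add with
      | nil => simp [pgcA_loop, pair_group_changes_alt]
      | cons a as_ => simp [pgcA_loop, pair_group_changes_alt, ih]

-- ===== VERDICT (by name: the statement is the Claim_ definition above) =====
theorem pair_group_changes_spec : Claim_equal_pair_group_changes := by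
  intro removed added _
  unfold Spec_pair_group_changes pair_group_changes
  simp [pgcA_loop_eq_alt]
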